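-- pv_equiv track=rewrite | github.com/B10sp4rt4n/fradma_dashboard3 | main/mapa_clientes.py | _cp_a_estado
-- ===== SOURCE A (Python) =====
-- _ESTADOS_CP = [
--     (1000, 16999, "Ciudad de México"),
--     (17000, 17999, "Morelos"),
--     (18000, 18999, "Nayarit"),
--     (20000, 20999, "Aguascalientes"),
--     (21000, 22999, "Baja California"),
--     (23000, 23999, "Baja California Sur"),
--     (24000, 24999, "Campeche"),
--     (25000, 27999, "Coahuila"),
--     (28000, 28999, "Colima"),
--     (29000, 31999, "Chiapas"),
--     (32000, 33999, "Chihuahua"),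
--     (34000, 35999, "Durango"),
--     (36000, 39999, "Guanajuato"),
--     (40000, 41999, "Guerrero"),
--     (42000, 43999, "Hidalgo"),
--     (44000, 49999, "Jalisco"),
--     (50000, 57999, "Estado de México"),
--     (58000, 61999, "Michoacán"),
--     (62000, 62999, "Morelos"),
--     (63000, 63999, "Nayarit"),
--     (64000, 67999, "Nuevo León"),
--     (68000, 71999, "Oaxaca"),
--     (72000, 75999, "Puebla"),
--     (76000, 76999, "Querétaro"),
--     (77000, 77999, "Quintana Roo"),
--     (78000, 79999, "San Luis Potosí"),
--     (80000, 82999, "Sinaloa"),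
--     (83000, 85999, "Sonora"),
--     (86000, 86999, "Tabasco"),
--     (87000, 89999, "Tamaulipas"),
--     (90000, 90999, "Tlaxcala"),
--     (91000, 96999, "Veracruz"),
--     (97000, 97999, "Yucatán"),
--     (98000, 99999, "Zacatecas"),
-- ]
--
-- def _cp_a_estado(cp: str) -> str:
--     try:
--         n = int(cp)
--         for lo, hi, estado in _ESTADOS_CP:
--             if lo <= n <= hi:
--                 return estado
--     except Exception:
--         pass
--     return "Otro"
-- ===== SOURCE B (Python) =====
-- # Flat lookup table: every range in the original map is aligned to whole thousands,
-- # so the state is fully determined by the thousands block n // 1000.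
-- _POR_MILES = {
--     1: "Ciudad de México",
--     2: "Ciudad de México",
--     3: "Ciudad de México",
--     4: "Ciudad de México",
--     5: "Ciudad de México",
--     6: "Ciudad de México",
--     7: "Ciudad de México",
--     8: "Ciudad de México",
--     9: "Ciudad de México",
--     10: "Ciudad de México",
--     11: "Ciudad de México",
--     12: "Ciudad de México",
--     13: "Ciudad de México",
--     14: "Ciudad de México",
--     15: "Ciudad de México",
--     16: "Ciudad de México",
--     17: "Morelos",
--     18: "Nayarit",
--     20: "Aguascalientes",
--     21: "Baja California",
--     22: "Baja California",
--     23: "Baja California Sur",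
--     24: "Campeche",
--     25: "Coahuila",
--     26: "Coahuila",
--     27: "Coahuila",
--     28: "Colima",
--     29: "Chiapas",
--     30: "Chiapas",
--     31: "Chiapas",
--     32: "Chihuahua",
--     33: "Chihuahua",
--     34: "Durango",
--     35: "Durango",
--     36: "Guanajuato",
--     37: "Guanajuato",
--     38: "Guanajuato",
--     39: "Guanajuato",
--     40: "Guerrero",
--     41: "Guerrero",
--     42: "Hidalgo",
--     43: "Hidalgo",
--     44: "Jalisco",
--     45: "Jalisco",
--     46: "Jalisco",
--     47: "Jalisco",
--     48: "Jalisco",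
--     49: "Jalisco",
--     50: "Estado de México",
--     51: "Estado de México",
--     52: "Estado de México",
--     53: "Estado de México",
--     54: "Estado de México",
--     55: "Estado de México",
--     56: "Estado de México",
--     57: "Estado de México",
--     58: "Michoacán",
--     59: "Michoacán",
--     60: "Michoacán",
--     61: "Michoacán",
--     62: "Morelos",
--     63: "Nayarit",
--     64: "Nuevo León",
--     65: "Nuevo León",
--     66: "Nuevo León",
--     67: "Nuevo León",
--     68: "Oaxaca",
--     69: "Oaxaca",
--     70: "Oaxaca",
--     71: "Oaxaca",
--     72: "Puebla",
--     73: "Puebla",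
--     74: "Puebla",
--     75: "Puebla",
--     76: "Querétaro",
--     77: "Quintana Roo",
--     78: "San Luis Potosí",
--     79: "San Luis Potosí",
--     80: "Sinaloa",
--     81: "Sinaloa",
--     82: "Sinaloa",
--     83: "Sonora",
--     84: "Sonora",
--     85: "Sonora",
--     86: "Tabasco",
--     87: "Tamaulipas",
--     88: "Tamaulipas",
--     89: "Tamaulipas",
--     90: "Tlaxcala",
--     91: "Veracruz",
--     92: "Veracruz",
--     93: "Veracruz",
--     94: "Veracruz",
--     95: "Veracruz",
--     96: "Veracruz",
--     97: "Yucatán",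
--     98: "Zacatecas",
--     99: "Zacatecas",
-- }
--
--
-- def _cp_a_estado(cp: str) -> str:
--     try:
--         n = int(cp)
--     except Exception:
--         return "Otro"
--     return _POR_MILES.get(n // 1000, "Otro")
-- ===== Notes on version B (the rewrite author's own statement) =====
-- stated objective: alternative
-- what changed: Replaces A's linear scan over the 34 (lo,hi,state) ranges by a flat literal table keyed on the thousands block n // 1000 (every range is aligned to whole thousands), so the body is a single dict lookup instead of a loop.
import Mathlib
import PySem

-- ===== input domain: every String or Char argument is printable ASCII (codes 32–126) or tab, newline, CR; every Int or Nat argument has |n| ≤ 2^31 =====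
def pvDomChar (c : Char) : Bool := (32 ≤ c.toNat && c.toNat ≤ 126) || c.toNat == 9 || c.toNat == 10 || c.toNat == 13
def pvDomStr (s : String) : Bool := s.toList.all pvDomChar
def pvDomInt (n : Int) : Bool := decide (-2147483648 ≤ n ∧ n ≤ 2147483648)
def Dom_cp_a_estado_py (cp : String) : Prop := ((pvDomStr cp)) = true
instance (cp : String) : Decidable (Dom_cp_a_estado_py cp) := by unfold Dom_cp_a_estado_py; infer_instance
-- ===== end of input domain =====

-- B replaces A's linear scan of (lo, hi, estado) ranges by a flat literal table keyed on the thousands block n // 1000 (all ranges are thousand-aligned); same return value everywhere.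

-- ===== PORT A =====
def estadosCP : List (Int × Int × String) := [
  ((1000 : Int), (16999 : Int), "Ciudad de México"),
  ((17000 : Int), (17999 : Int), "Morelos"),
  ((18000 : Int), (18999 : Int), "Nayarit"),
  ((20000 : Int), (20999 : Int), "Aguascalientes"),
  ((21000 : Int), (22999 : Int), "Baja California"),
  ((23000 : Int), (23999 : Int), "Baja California Sur"),
  ((24000 : Int), (24999 : Int), "Campeche"),
  ((25000 : Int), (27999 : Int), "Coahuila"),
  ((28000 : Int), (28999 : Int), "Colima"),
  ((29000 : Int), (31999 : Int), "Chiapas"),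
  ((32000 : Int), (33999 : Int), "Chihuahua"),
  ((34000 : Int), (35999 : Int), "Durango"),
  ((36000 : Int), (39999 : Int), "Guanajuato"),
  ((40000 : Int), (41999 : Int), "Guerrero"),
  ((42000 : Int), (43999 : Int), "Hidalgo"),
  ((44000 : Int), (49999 : Int), "Jalisco"),
  ((50000 : Int), (57999 : Int), "Estado de México"),
  ((58000 : Int), (61999 : Int), "Michoacán"),
  ((62000 : Int), (62999 : Int), "Morelos"),
  ((63000 : Int), (63999 : Int), "Nayarit"),
  ((64000 : Int), (67999 : Int), "Nuevo León"),
  ((68000 : Int), (71999 : Int), "Oaxaca"),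
  ((72000 : Int), (75999 : Int), "Puebla"),
  ((76000 : Int), (76999 : Int), "Querétaro"),
  ((77000 : Int), (77999 : Int), "Quintana Roo"),
  ((78000 : Int), (79999 : Int), "San Luis Potosí"),
  ((80000 : Int), (82999 : Int), "Sinaloa"),
  ((83000 : Int), (85999 : Int), "Sonora"),
  ((86000 : Int), (86999 : Int), "Tabasco"),
  ((87000 : Int), (89999 : Int), "Tamaulipas"),
  ((90000 : Int), (90999 : Int), "Tlaxcala"),
  ((91000 : Int), (96999 : Int), "Veracruz"),
  ((97000 : Int), (97999 : Int), "Yucatán"),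
  ((98000 : Int), (99999 : Int), "Zacatecas")
]

-- the for-loop of _cp_a_estado with its early return
def goA (n : Int) : List (Int × Int × String) → String
  | [] => "Otro"
  | (lo, hi, estado) :: rest => if lo ≤ n ∧ n ≤ hi then estado else goA n rest

def cp_a_estado_py (cp : String) : String :=
  match PySem.Int.ofStr? cp with
  | none => "Otro"          -- int(cp) raised; except Exception: pass → return "Otro"
  | some n => goA n estadosCP

-- ===== PORT B =====
-- the literal dict _POR_MILES of Source B
def porMiles : PySem.Dict Int String := PySem.Dict.mk [
    ((1 : Int), "Ciudad de México"),
    ((2 : Int), "Ciudad de México"),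
    ((3 : Int), "Ciudad de México"),
    ((4 : Int), "Ciudad de México"),
    ((5 : Int), "Ciudad de México"),
    ((6 : Int), "Ciudad de México"),
    ((7 : Int), "Ciudad de México"),
    ((8 : Int), "Ciudad de México"),
    ((9 : Int), "Ciudad de México"),
    ((10 : Int), "Ciudad de México"),
    ((11 : Int), "Ciudad de México"),
    ((12 : Int), "Ciudad de México"),
    ((13 : Int), "Ciudad de México"),
    ((14 : Int), "Ciudad de México"),
    ((15 : Int), "Ciudad de México"),
    ((16 : Int), "Ciudad de México"),
    ((17 : Int), "Morelos"),
    ((18 : Int), "Nayarit"),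
    ((20 : Int), "Aguascalientes"),
    ((21 : Int), "Baja California"),
    ((22 : Int), "Baja California"),
    ((23 : Int), "Baja California Sur"),
    ((24 : Int), "Campeche"),
    ((25 : Int), "Coahuila"),
    ((26 : Int), "Coahuila"),
    ((27 : Int), "Coahuila"),
    ((28 : Int), "Colima"),
    ((29 : Int), "Chiapas"),
    ((30 : Int), "Chiapas"),
    ((31 : Int), "Chiapas"),
    ((32 : Int), "Chihuahua"),
    ((33 : Int), "Chihuahua"),
    ((34 : Int), "Durango"),
    ((35 : Int), "Durango"),
    ((36 : Int), "Guanajuato"),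
    ((37 : Int), "Guanajuato"),
    ((38 : Int), "Guanajuato"),
    ((39 : Int), "Guanajuato"),
    ((40 : Int), "Guerrero"),
    ((41 : Int), "Guerrero"),
    ((42 : Int), "Hidalgo"),
    ((43 : Int), "Hidalgo"),
    ((44 : Int), "Jalisco"),
    ((45 : Int), "Jalisco"),
    ((46 : Int), "Jalisco"),
    ((47 : Int), "Jalisco"),
    ((48 : Int), "Jalisco"),
    ((49 : Int), "Jalisco"),
    ((50 : Int), "Estado de México"),
    ((51 : Int), "Estado de México"),
    ((52 : Int), "Estado de México"),
    ((53 : Int), "Estado de México"),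
    ((54 : Int), "Estado de México"),
    ((55 : Int), "Estado de México"),
    ((56 : Int), "Estado de México"),
    ((57 : Int), "Estado de México"),
    ((58 : Int), "Michoacán"),
    ((59 : Int), "Michoacán"),
    ((60 : Int), "Michoacán"),
    ((61 : Int), "Michoacán"),
    ((62 : Int), "Morelos"),
    ((63 : Int), "Nayarit"),
    ((64 : Int), "Nuevo León"),
    ((65 : Int), "Nuevo León"),
    ((66 : Int), "Nuevo León"),
    ((67 : Int), "Nuevo León"),
    ((68 : Int), "Oaxaca"),
    ((69 : Int), "Oaxaca"),
    ((70 : Int), "Oaxaca"),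
    ((71 : Int), "Oaxaca"),
    ((72 : Int), "Puebla"),
    ((73 : Int), "Puebla"),
    ((74 : Int), "Puebla"),
    ((75 : Int), "Puebla"),
    ((76 : Int), "Querétaro"),
    ((77 : Int), "Quintana Roo"),
    ((78 : Int), "San Luis Potosí"),
    ((79 : Int), "San Luis Potosí"),
    ((80 : Int), "Sinaloa"),
    ((81 : Int), "Sinaloa"),
    ((82 : Int), "Sinaloa"),
    ((83 : Int), "Sonora"),
    ((84 : Int), "Sonora"),
    ((85 : Int), "Sonora"),
    ((86 : Int), "Tabasco"),
    ((87 : Int), "Tamaulipas"),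
    ((88 : Int), "Tamaulipas"),
    ((89 : Int), "Tamaulipas"),
    ((90 : Int), "Tlaxcala"),
    ((91 : Int), "Veracruz"),
    ((92 : Int), "Veracruz"),
    ((93 : Int), "Veracruz"),
    ((94 : Int), "Veracruz"),
    ((95 : Int), "Veracruz"),
    ((96 : Int), "Veracruz"),
    ((97 : Int), "Yucatán"),
    ((98 : Int), "Zacatecas"),
    ((99 : Int), "Zacatecas")
]

def cp_a_estado_py_alt (cp : String) : String :=
  match PySem.Int.ofStr? cp with
  | none => "Otro"
  | some n => porMiles.getD (PySem.Int.floordiv n 1000) "Otro"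

-- ===== PRECONDITION & SPEC =====
def Spec_cp_a_estado_py (cp : String) (out : String) : Prop := out = cp_a_estado_py_alt cp
instance (cp : String) (out : String) : Decidable (Spec_cp_a_estado_py cp out) := by unfold Spec_cp_a_estado_py; infer_instance

-- ===== CLAIM (what is proved, stated in full; the proofs are below) =====
def Claim_equal_cp_a_estado_py : Prop := ∀ (cp : String), Dom_cp_a_estado_py cp → Spec_cp_a_estado_py cp (cp_a_estado_py cp)

-- ===== LEMMAS AND PROOFS =====

set_option maxHeartbeats 4000000 in
set_option maxRecDepth 10000 in
theorem core_cp (n : Int) :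
    goA n estadosCP = porMiles.getD (PySem.Int.floordiv n 1000) "Otro" := by
  rw [PySem.Int.floordiv_eq_ediv_of_pos (by norm_num)]
  simp only [estadosCP, goA]
  by_cases h1 : (1000:Int) ≤ n ∧ n ≤ 16999
  · rw [if_pos h1]
    obtain ⟨q, hq, hql, hqh⟩ : ∃ q : Int, n/1000 = q ∧ 1 ≤ q ∧ q ≤ 16 :=
      ⟨n/1000, rfl, by omega, by omega⟩
    rw [hq]
    interval_cases q <;> decide
  rw [if_neg h1]
  by_cases h2 : (17000:Int) ≤ n ∧ n ≤ 17999
  · rw [if_pos h2]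
    obtain ⟨q, hq, hql, hqh⟩ : ∃ q : Int, n/1000 = q ∧ 17 ≤ q ∧ q ≤ 17 :=
      ⟨n/1000, rfl, by omega, by omega⟩
    rw [hq]
    interval_cases q <;> decide
  rw [if_neg h2]
  by_cases h3 : (18000:Int) ≤ n ∧ n ≤ 18999
  · rw [if_pos h3]
    obtain ⟨q, hq, hql, hqh⟩ : ∃ q : Int, n/1000 = q ∧ 18 ≤ q ∧ q ≤ 18 :=
      ⟨n/1000, rfl, by omega, by omega⟩
    rw [hq]
    interval_cases q <;> decide
  rw [if_neg h3]
  by_cases h4 : (20000:Int) ≤ n ∧ n ≤ 20999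
  · rw [if_pos h4]
    obtain ⟨q, hq, hql, hqh⟩ : ∃ q : Int, n/1000 = q ∧ 20 ≤ q ∧ q ≤ 20 :=
      ⟨n/1000, rfl, by omega, by omega⟩
    rw [hq]
    interval_cases q <;> decide
  rw [if_neg h4]
  by_cases h5 : (21000:Int) ≤ n ∧ n ≤ 22999
  · rw [if_pos h5]
    obtain ⟨q, hq, hql, hqh⟩ : ∃ q : Int, n/1000 = q ∧ 21 ≤ q ∧ q ≤ 22 :=
      ⟨n/1000, rfl, by omega, by omega⟩
    rw [hq]
    interval_cases q <;> decide
  rw [if_neg h5]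
  by_cases h6 : (23000:Int) ≤ n ∧ n ≤ 23999
  · rw [if_pos h6]
    obtain ⟨q, hq, hql, hqh⟩ : ∃ q : Int, n/1000 = q ∧ 23 ≤ q ∧ q ≤ 23 :=
      ⟨n/1000, rfl, by omega, by omega⟩
    rw [hq]
    interval_cases q <;> decide
  rw [if_neg h6]
  by_cases h7 : (24000:Int) ≤ n ∧ n ≤ 24999
  · rw [if_pos h7]
    obtain ⟨q, hq, hql, hqh⟩ : ∃ q : Int, n/1000 = q ∧ 24 ≤ q ∧ q ≤ 24 :=
      ⟨n/1000, rfl, by omega, by omega⟩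
    rw [hq]
    interval_cases q <;> decide
  rw [if_neg h7]
  by_cases h8 : (25000:Int) ≤ n ∧ n ≤ 27999
  · rw [if_pos h8]
    obtain ⟨q, hq, hql, hqh⟩ : ∃ q : Int, n/1000 = q ∧ 25 ≤ q ∧ q ≤ 27 :=
      ⟨n/1000, rfl, by omega, by omega⟩
    rw [hq]
    interval_cases q <;> decide
  rw [if_neg h8]
  by_cases h9 : (28000:Int) ≤ n ∧ n ≤ 28999
  · rw [if_pos h9]
    obtain ⟨q, hq, hql, hqh⟩ : ∃ q : Int, n/1000 = q ∧ 28 ≤ q ∧ q ≤ 28 :=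
      ⟨n/1000, rfl, by omega, by omega⟩
    rw [hq]
    interval_cases q <;> decide
  rw [if_neg h9]
  by_cases h10 : (29000:Int) ≤ n ∧ n ≤ 31999
  · rw [if_pos h10]
    obtain ⟨q, hq, hql, hqh⟩ : ∃ q : Int, n/1000 = q ∧ 29 ≤ q ∧ q ≤ 31 :=
      ⟨n/1000, rfl, by omega, by omega⟩
    rw [hq]
    interval_cases q <;> decide
  rw [if_neg h10]
  by_cases h11 : (32000:Int) ≤ n ∧ n ≤ 33999
  · rw [if_pos h11]
    obtain ⟨q, hq, hql, hqh⟩ : ∃ q : Int, n/1000 = q ∧ 32 ≤ q ∧ q ≤ 33 :=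
      ⟨n/1000, rfl, by omega, by omega⟩
    rw [hq]
    interval_cases q <;> decide
  rw [if_neg h11]
  by_cases h12 : (34000:Int) ≤ n ∧ n ≤ 35999
  · rw [if_pos h12]
    obtain ⟨q, hq, hql, hqh⟩ : ∃ q : Int, n/1000 = q ∧ 34 ≤ q ∧ q ≤ 35 :=
      ⟨n/1000, rfl, by omega, by omega⟩
    rw [hq]
    interval_cases q <;> decide
  rw [if_neg h12]
  by_cases h13 : (36000:Int) ≤ n ∧ n ≤ 39999
  · rw [if_pos h13]
    obtain ⟨q, hq, hql, hqh⟩ : ∃ q : Int, n/1000 = q ∧ 36 ≤ q ∧ q ≤ 39 :=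
      ⟨n/1000, rfl, by omega, by omega⟩
    rw [hq]
    interval_cases q <;> decide
  rw [if_neg h13]
  by_cases h14 : (40000:Int) ≤ n ∧ n ≤ 41999
  · rw [if_pos h14]
    obtain ⟨q, hq, hql, hqh⟩ : ∃ q : Int, n/1000 = q ∧ 40 ≤ q ∧ q ≤ 41 :=
      ⟨n/1000, rfl, by omega, by omega⟩
    rw [hq]
    interval_cases q <;> decide
  rw [if_neg h14]
  by_cases h15 : (42000:Int) ≤ n ∧ n ≤ 43999
  · rw [if_pos h15]
    obtain ⟨q, hq, hql, hqh⟩ : ∃ q : Int, n/1000 = q ∧ 42 ≤ q ∧ q ≤ 43 :=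
      ⟨n/1000, rfl, by omega, by omega⟩
    rw [hq]
    interval_cases q <;> decide
  rw [if_neg h15]
  by_cases h16 : (44000:Int) ≤ n ∧ n ≤ 49999
  · rw [if_pos h16]
    obtain ⟨q, hq, hql, hqh⟩ : ∃ q : Int, n/1000 = q ∧ 44 ≤ q ∧ q ≤ 49 :=
      ⟨n/1000, rfl, by omega, by omega⟩
    rw [hq]
    interval_cases q <;> decide
  rw [if_neg h16]
  by_cases h17 : (50000:Int) ≤ n ∧ n ≤ 57999
  · rw [if_pos h17]
    obtain ⟨q, hq, hql, hqh⟩ : ∃ q : Int, n/1000 = q ∧ 50 ≤ q ∧ q ≤ 57 :=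
      ⟨n/1000, rfl, by omega, by omega⟩
    rw [hq]
    interval_cases q <;> decide
  rw [if_neg h17]
  by_cases h18 : (58000:Int) ≤ n ∧ n ≤ 61999
  · rw [if_pos h18]
    obtain ⟨q, hq, hql, hqh⟩ : ∃ q : Int, n/1000 = q ∧ 58 ≤ q ∧ q ≤ 61 :=
      ⟨n/1000, rfl, by omega, by omega⟩
    rw [hq]
    interval_cases q <;> decide
  rw [if_neg h18]
  by_cases h19 : (62000:Int) ≤ n ∧ n ≤ 62999
  · rw [if_pos h19]
    obtain ⟨q, hq, hql, hqh⟩ : ∃ q : Int, n/1000 = q ∧ 62 ≤ q ∧ q ≤ 62 :=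
      ⟨n/1000, rfl, by omega, by omega⟩
    rw [hq]
    interval_cases q <;> decide
  rw [if_neg h19]
  by_cases h20 : (63000:Int) ≤ n ∧ n ≤ 63999
  · rw [if_pos h20]
    obtain ⟨q, hq, hql, hqh⟩ : ∃ q : Int, n/1000 = q ∧ 63 ≤ q ∧ q ≤ 63 :=
      ⟨n/1000, rfl, by omega, by omega⟩
    rw [hq]
    interval_cases q <;> decide
  rw [if_neg h20]
  by_cases h21 : (64000:Int) ≤ n ∧ n ≤ 67999
  · rw [if_pos h21]
    obtain ⟨q, hq, hql, hqh⟩ : ∃ q : Int, n/1000 = q ∧ 64 ≤ q ∧ q ≤ 67 :=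
      ⟨n/1000, rfl, by omega, by omega⟩
    rw [hq]
    interval_cases q <;> decide
  rw [if_neg h21]
  by_cases h22 : (68000:Int) ≤ n ∧ n ≤ 71999
  · rw [if_pos h22]
    obtain ⟨q, hq, hql, hqh⟩ : ∃ q : Int, n/1000 = q ∧ 68 ≤ q ∧ q ≤ 71 :=
      ⟨n/1000, rfl, by omega, by omega⟩
    rw [hq]
    interval_cases q <;> decide
  rw [if_neg h22]
  by_cases h23 : (72000:Int) ≤ n ∧ n ≤ 75999
  · rw [if_pos h23]
    obtain ⟨q, hq, hql, hqh⟩ : ∃ q : Int, n/1000 = q ∧ 72 ≤ q ∧ q ≤ 75 :=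
      ⟨n/1000, rfl, by omega, by omega⟩
    rw [hq]
    interval_cases q <;> decide
  rw [if_neg h23]
  by_cases h24 : (76000:Int) ≤ n ∧ n ≤ 76999
  · rw [if_pos h24]
    obtain ⟨q, hq, hql, hqh⟩ : ∃ q : Int, n/1000 = q ∧ 76 ≤ q ∧ q ≤ 76 :=
      ⟨n/1000, rfl, by omega, by omega⟩
    rw [hq]
    interval_cases q <;> decide
  rw [if_neg h24]
  by_cases h25 : (77000:Int) ≤ n ∧ n ≤ 77999
  · rw [if_pos h25]
    obtain ⟨q, hq, hql, hqh⟩ : ∃ q : Int, n/1000 = q ∧ 77 ≤ q ∧ q ≤ 77 :=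
      ⟨n/1000, rfl, by omega, by omega⟩
    rw [hq]
    interval_cases q <;> decide
  rw [if_neg h25]
  by_cases h26 : (78000:Int) ≤ n ∧ n ≤ 79999
  · rw [if_pos h26]
    obtain ⟨q, hq, hql, hqh⟩ : ∃ q : Int, n/1000 = q ∧ 78 ≤ q ∧ q ≤ 79 :=
      ⟨n/1000, rfl, by omega, by omega⟩
    rw [hq]
    interval_cases q <;> decide
  rw [if_neg h26]
  by_cases h27 : (80000:Int) ≤ n ∧ n ≤ 82999
  · rw [if_pos h27]
    obtain ⟨q, hq, hql, hqh⟩ : ∃ q : Int, n/1000 = q ∧ 80 ≤ q ∧ q ≤ 82 :=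
      ⟨n/1000, rfl, by omega, by omega⟩
    rw [hq]
    interval_cases q <;> decide
  rw [if_neg h27]
  by_cases h28 : (83000:Int) ≤ n ∧ n ≤ 85999
  · rw [if_pos h28]
    obtain ⟨q, hq, hql, hqh⟩ : ∃ q : Int, n/1000 = q ∧ 83 ≤ q ∧ q ≤ 85 :=
      ⟨n/1000, rfl, by omega, by omega⟩
    rw [hq]
    interval_cases q <;> decide
  rw [if_neg h28]
  by_cases h29 : (86000:Int) ≤ n ∧ n ≤ 86999
  · rw [if_pos h29]
    obtain ⟨q, hq, hql, hqh⟩ : ∃ q : Int, n/1000 = q ∧ 86 ≤ q ∧ q ≤ 86 :=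
      ⟨n/1000, rfl, by omega, by omega⟩
    rw [hq]
    interval_cases q <;> decide
  rw [if_neg h29]
  by_cases h30 : (87000:Int) ≤ n ∧ n ≤ 89999
  · rw [if_pos h30]
    obtain ⟨q, hq, hql, hqh⟩ : ∃ q : Int, n/1000 = q ∧ 87 ≤ q ∧ q ≤ 89 :=
      ⟨n/1000, rfl, by omega, by omega⟩
    rw [hq]
    interval_cases q <;> decide
  rw [if_neg h30]
  by_cases h31 : (90000:Int) ≤ n ∧ n ≤ 90999
  · rw [if_pos h31]
    obtain ⟨q, hq, hql, hqh⟩ : ∃ q : Int, n/1000 = q ∧ 90 ≤ q ∧ q ≤ 90 :=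
      ⟨n/1000, rfl, by omega, by omega⟩
    rw [hq]
    interval_cases q <;> decide
  rw [if_neg h31]
  by_cases h32 : (91000:Int) ≤ n ∧ n ≤ 96999
  · rw [if_pos h32]
    obtain ⟨q, hq, hql, hqh⟩ : ∃ q : Int, n/1000 = q ∧ 91 ≤ q ∧ q ≤ 96 :=
      ⟨n/1000, rfl, by omega, by omega⟩
    rw [hq]
    interval_cases q <;> decide
  rw [if_neg h32]
  by_cases h33 : (97000:Int) ≤ n ∧ n ≤ 97999
  · rw [if_pos h33]
    obtain ⟨q, hq, hql, hqh⟩ : ∃ q : Int, n/1000 = q ∧ 97 ≤ q ∧ q ≤ 97 :=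
      ⟨n/1000, rfl, by omega, by omega⟩
    rw [hq]
    interval_cases q <;> decide
  rw [if_neg h33]
  by_cases h34 : (98000:Int) ≤ n ∧ n ≤ 99999
  · rw [if_pos h34]
    obtain ⟨q, hq, hql, hqh⟩ : ∃ q : Int, n/1000 = q ∧ 98 ≤ q ∧ q ≤ 99 :=
      ⟨n/1000, rfl, by omega, by omega⟩
    rw [hq]
    interval_cases q <;> decide
  rw [if_neg h34]
  symm
  apply PySem.Dict.getD_of_get?_eq_none
  simp [PySem.Dict.get?, porMiles]
  omega

-- ===== VERDICT (by name: the statement is the Claim_ definition above) =====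
theorem cp_a_estado_py_spec : Claim_equal_cp_a_estado_py := by
  intro cp _
  unfold Spec_cp_a_estado_py cp_a_estado_py cp_a_estado_py_alt
  cases PySem.Int.ofStr? cp with
  | none => rfl
  | some n => exact core_cp n
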